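-- pv_equiv track=rewrite | github.com/hoquem/KICKAI | scripts/audit_tool_parameter_passing.py | _has_context_parameters
-- ===== SOURCE A (Python) =====
-- from typing import Dict, List, Set, Tuple, Any
--
-- def _has_context_parameters(args: List[str], kwargs: Dict[str, str], content: str) -> bool:
--     """Check if parameters indicate context extraction."""
--     context_indicators = [
--         'context', 'execution_context', 'task_context', 'security_context',
--         'extract', 'get_context', 'parse_context'
--     ]
--
--     # Check arguments
--     for arg in args:
--         if any(indicator in arg.lower() for indicator in context_indicators):
--             return True
--
--     # Check keyword arguments
--     for key, value in kwargs.items():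
--         if any(indicator in key.lower() for indicator in context_indicators):
--             return True
--         if any(indicator in str(value).lower() for indicator in context_indicators):
--             return True
--
--     return False
-- ===== SOURCE B (Python) =====
-- def _has_context_parameters(args, kwargs, content):
--     """Check if parameters indicate context extraction.
--
--     Every indicator in A's list except 'extract' contains the substring
--     'context', so matching any of the seven is the same as matching
--     'context' or 'extract'. Scan args, keys and values in one flat pass.
--     """
--     texts = list(args) + [s for kv in kwargs.items() for s in kv]
--     return any('context' in t.lower() or 'extract' in t.lower() for t in texts)
-- ===== Notes on version B (the rewrite author's own statement) =====
-- stated objective: simpler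
-- what changed: Collapses the seven indicator substrings to the two minimal ones ('context' and 'extract', since every other indicator contains 'context') and checks them in one flat pass over args, keys and values instead of three loops each with an inner any() over seven indicators.
import Mathlib
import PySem

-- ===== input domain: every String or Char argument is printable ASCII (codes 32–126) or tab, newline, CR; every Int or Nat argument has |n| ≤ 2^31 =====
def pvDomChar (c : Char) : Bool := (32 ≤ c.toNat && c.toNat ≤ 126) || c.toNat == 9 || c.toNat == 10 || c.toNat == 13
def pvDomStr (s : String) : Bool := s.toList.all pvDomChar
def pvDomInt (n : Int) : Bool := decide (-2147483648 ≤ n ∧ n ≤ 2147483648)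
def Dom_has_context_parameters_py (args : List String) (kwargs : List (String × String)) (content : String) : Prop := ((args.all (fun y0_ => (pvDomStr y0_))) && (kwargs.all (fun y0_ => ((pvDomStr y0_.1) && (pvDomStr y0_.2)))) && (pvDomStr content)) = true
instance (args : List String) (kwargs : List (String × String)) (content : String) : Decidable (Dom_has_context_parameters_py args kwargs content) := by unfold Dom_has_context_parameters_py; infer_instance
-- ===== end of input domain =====

-- ===== PORT A =====
-- B is simpler: the seven indicators reduce to two minimal substrings checked in one flat pass.
-- the literal list from A
def pvCtxIndicators : List String :=
  ["context", "execution_context", "task_context", "security_context",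
   "extract", "get_context", "parse_context"]

-- 'for arg in args: if any(ind in arg.lower() ...): return True' then fall through
def pvA_argsLoop : List String → Bool
  | [] => false
  | arg :: rest =>
    if pvCtxIndicators.any (fun ind => PySem.Str.isIn ind (PySem.Str.lower arg)) then true
    else pvA_argsLoop rest

-- 'for key, value in kwargs.items(): …' (str(value) is value: values are strings here)
def pvA_kwLoop : List (String × String) → Bool
  | [] => false
  | (key, value) :: rest =>
    if pvCtxIndicators.any (fun ind => PySem.Str.isIn ind (PySem.Str.lower key)) then true
    else if pvCtxIndicators.any (fun ind => PySem.Str.isIn ind (PySem.Str.lower value)) then true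
    else pvA_kwLoop rest

def has_context_parameters_py (args : List String) (kwargs : List (String × String)) (_content : String) : Bool :=
  if pvA_argsLoop args then true else pvA_kwLoop kwargs

-- ===== PORT B =====
def has_context_parameters_py_alt (args : List String) (kwargs : List (String × String)) (_content : String) : Bool :=
  (args ++ kwargs.flatMap (fun kv => [kv.1, kv.2])).any
    (fun t => PySem.Str.isIn "context" (PySem.Str.lower t) || PySem.Str.isIn "extract" (PySem.Str.lower t))

-- ===== PRECONDITION & SPEC =====
def Spec_has_context_parameters_py (args : List String) (kwargs : List (String × String)) (content : String) (out : Bool) : Prop := out = has_context_parameters_py_alt args kwargs content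
instance (args : List String) (kwargs : List (String × String)) (content : String) (out : Bool) : Decidable (Spec_has_context_parameters_py args kwargs content out) := by unfold Spec_has_context_parameters_py; infer_instance

-- ===== CLAIM (what is proved, stated in full; the proofs are below) =====
def Claim_equal_has_context_parameters_py : Prop := ∀ (args : List String) (kwargs : List (String × String)) (content : String), Dom_has_context_parameters_py args kwargs content → Spec_has_context_parameters_py args kwargs content (has_context_parameters_py args kwargs content)

-- ===== LEMMAS AND PROOFS =====

-- a substring of an indicator found in s means the indicator's own minimal substring is in s
theorem pvIsIn_mono (a b s : String) (hab : a.toList <:+: b.toList)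
    (h : PySem.Str.isIn b s = true) : PySem.Str.isIn a s = true := by
  rw [PySem.Str.isIn_iff_infix] at *
  exact List.IsInfix.trans hab h

-- the seven-indicator test collapses to the two minimal substrings
theorem pvIndicators_reduce (s : String) :
    pvCtxIndicators.any (fun ind => PySem.Str.isIn ind s)
      = (PySem.Str.isIn "context" s || PySem.Str.isIn "extract" s) := by
  rw [Bool.eq_iff_iff]
  simp only [pvCtxIndicators, List.any_cons, List.any_nil, Bool.or_eq_true, Bool.or_false]
  constructor
  · rintro (h | h | h | h | h | h | h)
    · exact Or.inl h
    · exact Or.inl (pvIsIn_mono _ _ _ (by decide) h)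
    · exact Or.inl (pvIsIn_mono _ _ _ (by decide) h)
    · exact Or.inl (pvIsIn_mono _ _ _ (by decide) h)
    · exact Or.inr h
    · exact Or.inl (pvIsIn_mono _ _ _ (by decide) h)
    · exact Or.inl (pvIsIn_mono _ _ _ (by decide) h)
  · rintro (h | h)
    · exact Or.inl h
    · exact Or.inr (Or.inr (Or.inr (Or.inr (Or.inl h))))

def pvB_pred (t : String) : Bool :=
  PySem.Str.isIn "context" (PySem.Str.lower t) || PySem.Str.isIn "extract" (PySem.Str.lower t)

theorem pvA_argsLoop_eq (args : List String) : pvA_argsLoop args = args.any pvB_pred := by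
  induction args with
  | nil => rfl
  | cons a rest ih =>
    simp only [pvA_argsLoop, pvIndicators_reduce, List.any_cons, ← ih, pvB_pred]
    cases h : (PySem.Str.isIn "context" (PySem.Str.lower a) || PySem.Str.isIn "extract" (PySem.Str.lower a)) <;> simp [h]

theorem pvA_kwLoop_eq (kwargs : List (String × String)) :
    pvA_kwLoop kwargs = (kwargs.flatMap (fun kv => [kv.1, kv.2])).any pvB_pred := by
  induction kwargs with
  | nil => rfl
  | cons kv rest ih =>
    obtain ⟨k, v⟩ := kv
    simp only [pvA_kwLoop, pvIndicators_reduce, List.flatMap_cons, List.any_append, List.any_cons,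
      List.any_nil, ← ih, pvB_pred]
    cases hk : (PySem.Str.isIn "context" (PySem.Str.lower k) || PySem.Str.isIn "extract" (PySem.Str.lower k)) <;>
      cases hv : (PySem.Str.isIn "context" (PySem.Str.lower v) || PySem.Str.isIn "extract" (PySem.Str.lower v)) <;>
        simp [hk, hv]

-- ===== VERDICT (by name: the statement is the Claim_ definition above) =====
theorem has_context_parameters_py_spec : Claim_equal_has_context_parameters_py := by
  intro args kwargs content _
  unfold Spec_has_context_parameters_py has_context_parameters_py has_context_parameters_py_alt
  rw [pvA_argsLoop_eq, pvA_kwLoop_eq,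
    show (fun t => PySem.Str.isIn "context" (PySem.Str.lower t) || PySem.Str.isIn "extract" (PySem.Str.lower t)) = pvB_pred from rfl,
    List.any_append]
  cases h : args.any pvB_pred <;> simp [h]
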